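-- pv_equiv track=rewrite | github.com/cscenter/project_screenshots | src/screenshots/screenshot_filters/scrollbars_detector.py | check_if_vertical
-- ===== SOURCE A (Python) =====
-- def vertical_lines(lines, height, width):
--     vertical = []
--     for line in lines:
--         for x1,y1,x2,y2 in line:
--             if abs(y2 - y1) >= height / 6 and x1 == x2 and x1 >= width / 5:
--                 vertical.append((x1, y1, x2, y2))
--     return vertical
--
-- def check_if_vertical(lines, height, width):
--     lines = vertical_lines(lines, height, width)
--     if (len(lines) < 2):
--         return False
--     lines.sort() # Should sort based on x1 first
--     lines.reverse()
--     fx1, fy1, fx2, fy2 = lines[0]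
--     for idx in range(len(lines)):
--         sx1, sy1, sx2, sy2 = lines[idx]
--         if (fx1 - sx1 > 3): # threshholding many lines on the same space
--             if (fx1 - sx1 < width / 5):
--                 return True
--             else:
--                 fx1, fy1, fx2, fy2 = sx1, sy1, sx2, sy2
--     return False
-- ===== SOURCE B (Python) =====
-- def check_if_vertical(lines, height, width):
--     xs = [x1 for line in lines for (x1, y1, x2, y2) in line
--           if abs(y2 - y1) >= height / 6 and x1 == x2 and x1 >= width / 5]
--     if len(xs) < 2:
--         return False
--     r = max(xs)
--     while True:
--         lower = [y for y in xs if y <= r - 4]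
--         if not lower:
--             return False
--         nxt = max(lower)
--         if r - nxt < width / 5:
--             return True
--         r = nxt
-- ===== Notes on version B (the rewrite author's own statement) =====
-- stated objective: alternative
-- what changed: B never sorts: it keeps the unsorted multiset of x1 coordinates and finds each successive representative by repeated max-extraction (max of the values at least 4 below the current representative), testing each extracted gap against width/5, replacing A's sort+reverse+early-returning scan over 4-tuples.
import Mathlib
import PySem

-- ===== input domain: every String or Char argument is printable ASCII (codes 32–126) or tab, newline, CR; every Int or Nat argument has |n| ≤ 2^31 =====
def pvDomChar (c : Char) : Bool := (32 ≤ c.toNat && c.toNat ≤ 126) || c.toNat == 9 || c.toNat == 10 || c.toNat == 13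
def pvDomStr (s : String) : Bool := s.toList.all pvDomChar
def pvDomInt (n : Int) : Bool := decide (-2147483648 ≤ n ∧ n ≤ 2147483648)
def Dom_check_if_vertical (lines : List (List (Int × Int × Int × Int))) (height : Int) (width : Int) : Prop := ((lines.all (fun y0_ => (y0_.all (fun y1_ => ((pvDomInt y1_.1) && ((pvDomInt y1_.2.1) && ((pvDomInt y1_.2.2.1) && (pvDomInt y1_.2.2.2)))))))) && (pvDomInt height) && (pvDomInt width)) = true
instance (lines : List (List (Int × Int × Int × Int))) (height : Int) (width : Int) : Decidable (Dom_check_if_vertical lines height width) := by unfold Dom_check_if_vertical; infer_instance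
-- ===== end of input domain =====

-- B replaces A's sort+reverse+early-returning scan over 4-tuples by repeated max-extraction
-- over the unsorted x1 multiset (no sorting); objective: alternative (no speed claim).
-- Float notes (both ports): on this domain (|ints| ≤ 2^31) Python's float comparisons
-- `abs(y2-y1) >= height/6`, `x1 >= width/5`, `r - nxt < width/5` coincide exactly with the
-- rational comparisons ported here as `height ≤ 6*|y2-y1|`, `width ≤ 5*x1`, `5*(r-nxt) < width`
-- (the integer sides are exact in binary64 and the quotient's rounding error is < 1/6 resp. 1/5).

-- ===== PORT A =====
-- Python's list.sort() on 4-tuples is lexicographic; on this domain (|ints| ≤ 2^31 < 2^33)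
-- that order is exactly the order of this injective base-2^34 encoding key.
def pvKeyA (t : Int × Int × Int × Int) : Int :=
  ((t.1 * 17179869184 + t.2.1) * 17179869184 + t.2.2.1) * 17179869184 + t.2.2.2

def vertical_lines (lines : List (List (Int × Int × Int × Int))) (height : Int) (width : Int) :
    List (Int × Int × Int × Int) :=
  lines.foldl (fun vertical line =>
    line.foldl (fun vertical t =>
      if height ≤ 6 * |t.2.2.2 - t.2.1| && t.1 == t.2.2.1 && width ≤ 5 * t.1 then
        vertical ++ [t]
      else vertical) vertical) []

def pvLoopA : List (Int × Int × Int × Int) → (Int × Int × Int × Int) → Int → Bool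
  | [], _, _ => false
  | s :: rest, f, width =>
    if f.1 - s.1 > 3 then
      if 5 * (f.1 - s.1) < width then true else pvLoopA rest s width
    else pvLoopA rest f width

def check_if_vertical (lines : List (List (Int × Int × Int × Int))) (height : Int) (width : Int) : Bool :=
  let v := vertical_lines lines height width
  if v.length < 2 then false
  else
    let srt := (PySem.List.sorted v (fun t => pvKeyA t) false).reverse  -- lines.sort(); lines.reverse()
    match srt with
    | [] => false            -- unreachable: srt has ≥ 2 elements
    | f :: _ => pvLoopA srt f width

-- ===== PORT B =====
-- Source B's `while True` loop; the fuel argument (xs.length at the call site) only makes the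
-- recursion total — each iteration strictly shrinks the filtered list, so it never runs out.
def pvLoopB (xs : List Int) (width : Int) : Nat → Int → Bool
  | 0, _ => false
  | fuel+1, r =>
    match PySem.List.max? (xs.filter (fun y => y ≤ r - 4)) (fun x => x) with  -- lower = [y for y in xs if y <= r-4]; max(lower)
    | none => false
    | some nxt => if 5 * (r - nxt) < width then true else pvLoopB xs width fuel nxt

def check_if_vertical_alt (lines : List (List (Int × Int × Int × Int))) (height : Int) (width : Int) : Bool :=
  let xs := lines.foldl (fun xs line =>
    line.foldl (fun xs t =>
      if height ≤ 6 * |t.2.2.2 - t.2.1| && t.1 == t.2.2.1 && width ≤ 5 * t.1 then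
        xs ++ [t.1]
      else xs) xs) []
  if xs.length < 2 then false
  else pvLoopB xs width xs.length ((PySem.List.max? xs (fun x => x)).getD 0)  -- r = max(xs); none unreachable

-- ===== PRECONDITION & SPEC =====
def Spec_check_if_vertical (lines : List (List (Int × Int × Int × Int))) (height : Int) (width : Int) (out : Bool) : Prop := out = check_if_vertical_alt lines height width
instance (lines : List (List (Int × Int × Int × Int))) (height : Int) (width : Int) (out : Bool) : Decidable (Spec_check_if_vertical lines height width out) := by unfold Spec_check_if_vertical; infer_instance

-- ===== CLAIM (what is proved, stated in full; the proofs are below) =====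
def Claim_equal_check_if_vertical : Prop := ∀ (lines : List (List (Int × Int × Int × Int))) (height : Int) (width : Int), Dom_check_if_vertical lines height width → Spec_check_if_vertical lines height width (check_if_vertical lines height width)


-- ===== LEMMAS AND PROOFS =====

-- the greedy gap list of a descending scan: the common mathematical object both ports compute
def pvGaps : List Int → Int → List Int
  | [], _ => []
  | x :: rest, last =>
    if last - x > 3 then (last - x) :: pvGaps rest x else pvGaps rest last

-- the shared filter condition of both ports
def pvP (height width : Int) (t : Int × Int × Int × Int) : Bool :=
  height ≤ 6 * |t.2.2.2 - t.2.1| && t.1 == t.2.2.1 && width ≤ 5 * t.1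

theorem pv_vl_eq (lines : List (List (Int × Int × Int × Int))) (height width : Int) :
    vertical_lines lines height width = lines.flatMap (fun line => line.filter (pvP height width)) := by
  simp only [vertical_lines]
  have hinner : ∀ (line : List (Int × Int × Int × Int)) (acc : List (Int × Int × Int × Int)),
      line.foldl (fun vertical t =>
        if height ≤ 6 * |t.2.2.2 - t.2.1| && t.1 == t.2.2.1 && width ≤ 5 * t.1 then
          vertical ++ [t]
        else vertical) acc
      = acc ++ (line.filter (fun t => height ≤ 6 * |t.2.2.2 - t.2.1| && t.1 == t.2.2.1 && width ≤ 5 * t.1)).map (fun t => t) := by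
    intro line acc
    exact PySem.List.foldl_append_if _ (fun t => t) line acc
  simp only [hinner, List.map_id_fun', id_eq, PySem.List.foldl_append_eq_flatMap, List.nil_append]
  rfl

theorem pv_xs_eq (lines : List (List (Int × Int × Int × Int))) (height width : Int) :
    lines.foldl (fun xs line =>
      line.foldl (fun xs t =>
        if height ≤ 6 * |t.2.2.2 - t.2.1| && t.1 == t.2.2.1 && width ≤ 5 * t.1 then
          xs ++ [t.1]
        else xs) xs) []
    = (vertical_lines lines height width).map (fun t => t.1) := by
  rw [pv_vl_eq, List.map_flatMap]
  have hinner : ∀ (line : List (Int × Int × Int × Int)) (acc : List Int),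
      line.foldl (fun xs t =>
        if height ≤ 6 * |t.2.2.2 - t.2.1| && t.1 == t.2.2.1 && width ≤ 5 * t.1 then
          xs ++ [t.1]
        else xs) acc
      = acc ++ (line.filter (pvP height width)).map (fun t => t.1) := by
    intro line acc
    exact PySem.List.foldl_append_if _ (fun t => t.1) line acc
  simp only [hinner, PySem.List.foldl_append_eq_flatMap, List.nil_append]

def pvBnd (n : Int) : Prop := -2147483648 ≤ n ∧ n ≤ 2147483648

theorem pv_key_mono {a b : Int × Int × Int × Int}
    (ha : pvBnd a.1 ∧ pvBnd a.2.1 ∧ pvBnd a.2.2.1 ∧ pvBnd a.2.2.2)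
    (hb : pvBnd b.1 ∧ pvBnd b.2.1 ∧ pvBnd b.2.2.1 ∧ pvBnd b.2.2.2)
    (h : pvKeyA a ≤ pvKeyA b) : a.1 ≤ b.1 := by
  obtain ⟨a1, a2, a3, a4⟩ := a
  obtain ⟨b1, b2, b3, b4⟩ := b
  simp only [pvKeyA, pvBnd] at h ha hb
  omega

theorem pv_bounds (lines : List (List (Int × Int × Int × Int))) (height width : Int)
    (hDom : Dom_check_if_vertical lines height width) :
    ∀ t ∈ vertical_lines lines height width,
      pvBnd t.1 ∧ pvBnd t.2.1 ∧ pvBnd t.2.2.1 ∧ pvBnd t.2.2.2 := by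
  intro t ht
  rw [pv_vl_eq] at ht
  rw [List.mem_flatMap] at ht
  obtain ⟨line, hline, ht⟩ := ht
  rw [List.mem_filter] at ht
  simp only [Dom_check_if_vertical, Bool.and_eq_true, List.all_eq_true, pvDomInt,
    decide_eq_true_eq] at hDom
  have := hDom.1.1 line hline t ht.1
  simpa [pvBnd] using this

theorem pv_map_fst_sorted (v : List (Int × Int × Int × Int))
    (hbnd : ∀ t ∈ v, pvBnd t.1 ∧ pvBnd t.2.1 ∧ pvBnd t.2.2.1 ∧ pvBnd t.2.2.2) :
    ((PySem.List.sorted v (fun t => pvKeyA t) false).reverse).map (fun t => t.1)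
      = PySem.List.sorted (v.map (fun t => t.1)) (fun x => x) true := by
  apply List.Perm.eq_of_pairwise (le := fun a b : Int => b ≤ a)
  · exact fun a b _ _ h1 h2 => le_antisymm h2 h1
  · rw [List.pairwise_map, List.pairwise_reverse]
    refine (PySem.List.sorted_pairwise v (fun t => pvKeyA t)).imp_of_mem ?_
    intro a b hma hmb hk
    have hav : a ∈ v := (PySem.List.mem_sorted v _ false a).mp hma
    have hbv : b ∈ v := (PySem.List.mem_sorted v _ false b).mp hmb
    exact pv_key_mono (hbnd a hav) (hbnd b hbv) hk
  · exact PySem.List.sorted_pairwise_rev (v.map (fun t => t.1)) (fun x => x)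
  · exact (((List.reverse_perm _).trans (PySem.List.sorted_perm v _ false)).map _).trans
      (PySem.List.sorted_perm (v.map (fun t => t.1)) _ true).symm

theorem pv_max_eq_head (xs : List Int) {m : Int} {t : List Int}
    (hsrt : PySem.List.sorted xs (fun x => x) true = m :: t) :
    (PySem.List.max? xs (fun x => x)).getD 0 = m := by
  cases hmax : PySem.List.max? xs (fun x => x) with
  | none =>
    have : xs = [] := (PySem.List.max?_eq_none_iff xs _).mp hmax
    subst this
    simp [PySem.List.sorted] at hsrt
  | some m' =>
    have hm'x : m' ∈ xs := PySem.List.max?_mem hmax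
    have hm : m ∈ xs := by
      have : m ∈ PySem.List.sorted xs (fun x => x) true := by rw [hsrt]; exact List.mem_cons_self
      exact (PySem.List.mem_sorted xs _ true m).mp this
    have h1 : m' ≤ m := PySem.List.key_head_sorted_rev_ge xs (fun x => x) hsrt m' hm'x
    have h2 : m ≤ m' := PySem.List.max?_isMax hmax m hm
    simpa using le_antisymm h1 h2

theorem pv_loopA_eq (width : Int) :
    ∀ (ts : List (Int × Int × Int × Int)) (f : Int × Int × Int × Int),
      pvLoopA ts f width
        = (pvGaps (ts.map (fun t => t.1)) f.1).any (fun gap => 5 * gap < width) := by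
  intro ts
  induction ts with
  | nil => intro f; simp [pvLoopA, pvGaps]
  | cons s rest ih =>
    intro f
    simp only [pvLoopA, List.map_cons, pvGaps]
    by_cases h3 : f.1 - s.1 > 3
    · by_cases hw : 5 * (f.1 - s.1) < width <;> simp [h3, hw, ih s]
    · simp [h3, ih f]

-- on a descending list, dropping the values within 3 of the current representative
-- upfront does not change the greedy gap list
theorem pv_gaps_filter :
    ∀ (l : List Int) (r : Int), l.Pairwise (fun a b => b ≤ a) →
      pvGaps l r = pvGaps (l.filter (fun y => y ≤ r - 4)) r := by
  intro l
  induction l with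
  | nil => intro r _; rfl
  | cons x t ih =>
    intro r hp
    rw [List.pairwise_cons] at hp
    by_cases hx : x ≤ r - 4
    · have h3 : r - x > 3 := by omega
      have ht : t.filter (fun y => y ≤ r - 4) = t :=
        List.filter_eq_self.mpr (fun y hy => by simpa using le_trans (hp.1 y hy) hx)
      simp [hx, pvGaps, h3, ht]
    · have h3 : ¬ (r - x > 3) := by omega
      simp only [List.filter_cons, hx, decide_false, if_false, pvGaps, h3]
      exact ih r hp.2

-- B's repeated max-extraction computes the greedy gap test on the (conceptual) sorted list
theorem pv_loopB_eq (xs : List Int) (width : Int) :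
    ∀ (fuel : Nat) (r : Int), (xs.filter (fun y => y ≤ r - 4)).length < fuel →
      pvLoopB xs width fuel r
        = (pvGaps ((PySem.List.sorted xs (fun x => x) true).filter (fun y => y ≤ r - 4)) r).any
            (fun gap => 5 * gap < width) := by
  intro fuel
  induction fuel with
  | zero => intro r h; omega
  | succ fuel ih =>
    intro r hlen
    have hperm : ((PySem.List.sorted xs (fun x => x) true).filter (fun y => y ≤ r - 4)).Perm
        (xs.filter (fun y => y ≤ r - 4)) :=
      (PySem.List.sorted_perm xs (fun x => x) true).filter _
    cases hmax : PySem.List.max? (xs.filter (fun y => y ≤ r - 4)) (fun x => x) with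
    | none =>
      have hnil : xs.filter (fun y => y ≤ r - 4) = [] :=
        (PySem.List.max?_eq_none_iff _ _).mp hmax
      have hsnil : (PySem.List.sorted xs (fun x => x) true).filter (fun y => y ≤ r - 4) = [] := by
        have := hperm; rw [hnil] at this; exact this.eq_nil
      simp [pvLoopB, hmax, hsnil, pvGaps]
    | some nxt =>
      have hnxt_mem : nxt ∈ xs.filter (fun y => y ≤ r - 4) := PySem.List.max?_mem hmax
      have hnxt_le : nxt ≤ r - 4 := by
        have := List.mem_filter.mp hnxt_mem; simpa using this.2
      -- the sorted filtered list is nonempty with head = nxt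
      have hpair : ((PySem.List.sorted xs (fun x => x) true).filter (fun y => y ≤ r - 4)).Pairwise
          (fun a b : Int => b ≤ a) :=
        (PySem.List.sorted_pairwise_rev xs (fun x => x)).filter _
      obtain ⟨m, rest, hcons⟩ : ∃ m rest,
          (PySem.List.sorted xs (fun x => x) true).filter (fun y => y ≤ r - 4) = m :: rest := by
        cases hc : (PySem.List.sorted xs (fun x => x) true).filter (fun y => y ≤ r - 4) with
        | nil =>
          exfalso
          have := hperm; rw [hc] at this
          rw [this.symm.eq_nil] at hnxt_mem
          simp at hnxt_mem
        | cons m rest => exact ⟨m, rest, rfl⟩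
      have hm_eq : m = nxt := by
        have hm_mem : m ∈ xs.filter (fun y => y ≤ r - 4) :=
          hperm.mem_iff.mp (by rw [hcons]; exact List.mem_cons_self)
        have h1 : m ≤ nxt := PySem.List.max?_isMax hmax m hm_mem
        have h2 : nxt ≤ m := by
          have : nxt ∈ m :: rest := by rw [← hcons]; exact hperm.mem_iff.mpr hnxt_mem
          rcases List.mem_cons.mp this with h | h
          · omega
          · rw [hcons] at hpair
            exact (List.pairwise_cons.mp hpair).1 nxt h
        omega
      subst hm_eq
      have h3 : r - m > 3 := by omega
      rw [hcons] at hpair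
      by_cases hw : 5 * (r - m) < width
      · simp [pvLoopB, hmax, hw, hcons, pvGaps, h3]
      · -- recursive case
        have hstep : (PySem.List.sorted xs (fun x => x) true).filter (fun y => y ≤ m - 4)
            = rest.filter (fun y => y ≤ m - 4) := by
          have hsub : (PySem.List.sorted xs (fun x => x) true).filter (fun y => y ≤ m - 4)
              = ((PySem.List.sorted xs (fun x => x) true).filter (fun y => y ≤ r - 4)).filter
                  (fun y => y ≤ m - 4) := by
            rw [List.filter_filter]
            apply List.filter_congr
            intro y _
            by_cases hy : y ≤ m - 4
            · simp [hy] <;> omega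
            · simp [hy]
          rw [hsub, hcons, List.filter_cons]
          have : ¬ (m ≤ m - 4) := by omega
          simp [this]
        have hfilter_sub : xs.filter (fun y => y ≤ m - 4)
            = (xs.filter (fun y => y ≤ r - 4)).filter (fun y => y ≤ m - 4) := by
          rw [List.filter_filter]
          apply List.filter_congr
          intro y _
          by_cases hy : y ≤ m - 4
          · simp [hy] <;> omega
          · simp [hy]
        have hlt : (xs.filter (fun y => y ≤ m - 4)).length < fuel := by
          rw [hfilter_sub]
          have hne : ∃ x ∈ xs.filter (fun y => y ≤ r - 4), ¬ ((fun y => decide (y ≤ m - 4)) x = true) := by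
            exact ⟨m, hnxt_mem, by simp⟩
          have hstrict : ((xs.filter (fun y => y ≤ r - 4)).filter (fun y => y ≤ m - 4)).length
              < (xs.filter (fun y => y ≤ r - 4)).length := by
            rcases hne with ⟨x, hx, hnx⟩
            exact List.length_filter_lt_length_iff_exists.mpr ⟨x, hx, by simpa using hnx⟩
          omega
        have hrec := ih m hlt
        rw [hstep] at hrec
        have hrest : pvGaps rest m = pvGaps (rest.filter (fun y => y ≤ m - 4)) m :=
          pv_gaps_filter rest m (List.pairwise_cons.mp hpair).2
        simp only [pvLoopB, hmax, hw, if_false, hcons, pvGaps, h3, if_pos]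
        simp only [List.any_cons, hw, decide_false, Bool.false_or]
        rw [hrec, ← hrest]


-- ===== VERDICT (by name: the statement is the Claim_ definition above) =====
theorem check_if_vertical_spec : Claim_equal_check_if_vertical := by
  intro lines height width hDom
  unfold Spec_check_if_vertical
  simp only [check_if_vertical, check_if_vertical_alt, pv_xs_eq]
  set v := vertical_lines lines height width with hv
  rw [List.length_map]
  by_cases hlen : v.length < 2
  · simp [hlen]
  · simp only [hlen, if_false]
    set xs := v.map (fun t => t.1) with hxs
    have hne : (PySem.List.sorted v (fun t => pvKeyA t) false).reverse ≠ [] := by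
      intro hnil
      have : v.length = 0 := by
        have := congrArg List.length hnil
        simpa [PySem.List.length_sorted] using this
      omega
    obtain ⟨f, rest, hsrt⟩ := List.exists_cons_of_ne_nil hne
    have hmap := pv_map_fst_sorted v (pv_bounds lines height width hDom)
    rw [hsrt, List.map_cons] at hmap
    -- A's side: greedy scan over the sorted x list
    rw [hsrt]
    show pvLoopA (f :: rest) f width = _
    rw [pv_loopA_eq width (f :: rest) f, List.map_cons, hmap]
    -- B's side: repeated max-extraction
    have hr : (PySem.List.max? xs (fun x => x)).getD 0 = f.1 := pv_max_eq_head xs hmap.symm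
    have hfx : f.1 ∈ xs := by
      have : f.1 ∈ PySem.List.sorted xs (fun x => x) true := by
        rw [← hmap]; exact List.mem_cons_self
      exact (PySem.List.mem_sorted xs _ true f.1).mp this
    have hfuel : (xs.filter (fun y => y ≤ f.1 - 4)).length < v.length := by
      have hstrict : (xs.filter (fun y => y ≤ f.1 - 4)).length < xs.length :=
        List.length_filter_lt_length_iff_exists.mpr ⟨f.1, hfx, by simp⟩
      rw [show xs.length = v.length from by simp [hxs]] at hstrict
      exact hstrict
    rw [hr, pv_loopB_eq xs width v.length f.1 hfuel,
        ← pv_gaps_filter _ f.1 (PySem.List.sorted_pairwise_rev xs (fun x => x)), ← hmap]
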